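-- pv_equiv track=rewrite | github.com/Jakotops/Six-Guys | Task2/speed.py | string2vec
-- ===== SOURCE A (Python) =====
-- def string2vec(inp):
--     out = []
--     line = []
--     for c in inp:
--         if c == '\n':
--             out.append(line)
--             line = []
--         else:
--             line.append(int(c))
--     out.append(line)
--     return out
-- ===== SOURCE B (Python) =====
-- def string2vec(inp):
--     return [[int(c) for c in line] for line in inp.split('\n')]
-- ===== Notes on version B (the rewrite author's own statement) =====
-- stated objective: idiomatic
-- what changed: B splits the string into lines first and then converts each line with a nested comprehension, instead of A's single character loop that interleaves splitting and conversion via mutable accumulators.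
import Mathlib
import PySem

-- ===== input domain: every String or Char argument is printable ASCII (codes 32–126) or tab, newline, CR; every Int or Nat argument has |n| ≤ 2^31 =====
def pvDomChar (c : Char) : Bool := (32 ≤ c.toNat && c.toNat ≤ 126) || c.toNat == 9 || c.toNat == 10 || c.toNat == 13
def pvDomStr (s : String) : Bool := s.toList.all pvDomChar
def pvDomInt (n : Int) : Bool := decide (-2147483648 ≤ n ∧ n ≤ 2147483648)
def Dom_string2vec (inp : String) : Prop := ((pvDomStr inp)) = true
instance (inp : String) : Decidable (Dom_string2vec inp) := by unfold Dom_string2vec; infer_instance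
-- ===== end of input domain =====

-- B separates splitting from conversion (split on '\n', then nested map) instead of A's
-- single interleaved character loop; same O(n) cost, more idiomatic decomposition.


-- ===== PORT A =====
-- int(c) on a single digit character (Pre_ guarantees digits only): exact there
def pvDigit (c : Char) : Int := (c.toNat : Int) - 48

-- A's loop: mutable (out, line), append line on '\n', else append the digit
def pvLoopA : List Char → List (List Int) → List Int → List (List Int)
  | [], out, line => out ++ [line]
  | c :: cs, out, line =>
      if c = '\n' then pvLoopA cs (out ++ [line]) []
      else pvLoopA cs out (line ++ [pvDigit c])

def string2vec (inp : String) : List (List Int) :=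
  pvLoopA inp.toList [] []

-- ===== PORT B =====
-- hand transliteration of str.split('\n') (exact: Python keeps empty pieces, '' -> [''])
def pvSplitNl : List Char → List (List Char)
  | [] => [[]]
  | c :: cs =>
      if c = '\n' then [] :: pvSplitNl cs
      else
        match pvSplitNl cs with
        | [] => [[c]]
        | l :: ls => (c :: l) :: ls

def string2vec_alt (inp : String) : List (List Int) :=
  (pvSplitNl inp.toList).map (fun line => line.map pvDigit)

-- ===== PRECONDITION & SPEC =====
-- Pre_ excludes exactly the inputs where Python's int(c) raises ValueError:
-- every character must be a decimal digit or '\n' (both A and B raise otherwise).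
def Pre_string2vec (inp : String) : Prop :=
  inp.toList.all (fun c => c == '\n' || PySem.Chars.isdigit c) = true
instance (inp : String) : Decidable (Pre_string2vec inp) := by unfold Pre_string2vec; infer_instance
def pvWitness_string2vec : String := "12\n3\n"

def Spec_string2vec (inp : String) (out : List (List Int)) : Prop := out = string2vec_alt inp
instance (inp : String) (out : List (List Int)) : Decidable (Spec_string2vec inp out) := by unfold Spec_string2vec; infer_instance

-- ===== CLAIM (what is proved, stated in full; the proofs are below) =====
def Claim_equal_string2vec : Prop := ∀ (inp : String), Dom_string2vec inp → Pre_string2vec inp → Spec_string2vec inp (string2vec inp)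

-- ===== LEMMAS AND PROOFS =====
theorem pvSplitNl_ne_nil (cs : List Char) : pvSplitNl cs ≠ [] := by
  cases cs with
  | nil => simp [pvSplitNl]
  | cons c cs =>
    simp only [pvSplitNl]
    split
    · simp
    · cases h : pvSplitNl cs <;> simp

theorem pvLoopA_eq (cs : List Char) : ∀ (out : List (List Int)) (line : List Int),
    pvLoopA cs out line =
      match pvSplitNl cs with
      | [] => out ++ [line]
      | l :: ls => out ++ (line ++ l.map pvDigit) :: ls.map (fun p => p.map pvDigit) := by
  induction cs with
  | nil => intro out line; simp [pvLoopA, pvSplitNl]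
  | cons c cs ih =>
    intro out line
    by_cases hc : c = '\n'
    · simp only [pvLoopA, pvSplitNl, if_pos hc, ih]
      cases h : pvSplitNl cs with
      | nil => exact absurd h (pvSplitNl_ne_nil cs)
      | cons l ls => simp
    · simp only [pvLoopA, pvSplitNl, if_neg hc, ih]
      cases h : pvSplitNl cs with
      | nil => exact absurd h (pvSplitNl_ne_nil cs)
      | cons l ls => simp

-- ===== VERDICT (by name: the statement is the Claim_ definition above) =====
theorem string2vec_spec : Claim_equal_string2vec := by
  intro inp _ _
  unfold Spec_string2vec string2vec string2vec_alt
  rw [pvLoopA_eq]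
  cases h : pvSplitNl inp.toList with
  | nil => exact absurd h (pvSplitNl_ne_nil _)
  | cons l ls => simp
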